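-- pv_equiv track=rewrite | github.com/Sonic0/local-crontab | local_crontab/converter.py | _group_days
-- ===== SOURCE A (Python) =====
-- from typing import Optional, List
--
-- CronConverterNestedLists = List[List[List[int]]]
--
-- def _group_days(utc_list_crontabs: CronConverterNestedLists) -> CronConverterNestedLists:
--     """Group days together by hour, minute and month.
--
--     :param utc_list_crontabs: Nested list of crontabs previously grouped in hours.
--     :return: acc (nested list of ints): filtered nested list made up of cron lists readable by Cron-Converter Object.
--     """
--     acc = []
--     for element in utc_list_crontabs:
--         if len(acc) > 0 and \
--                 acc[-1][0] == element[0] and \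
--                 acc[-1][1] == element[1] and \
--                 acc[-1][3] == element[3]:
--             acc[-1][2].append(element[2][0])
--         else:
--             acc.append(element)
--     return acc
-- ===== SOURCE B (Python) =====
-- def _group_days(utc_list_crontabs):
--     """Group days together by hour, minute and month (run-splitting rewrite).
--
--     Walks the input run by run: takes the first element of each maximal
--     consecutive run sharing hour, minute and month, extends its day list with
--     the first day of every other member of the run, and emits it.
--     Like the original, it mutates the emitted elements' day lists in place.
--     """
--     out = []
--     rest = utc_list_crontabs
--     while rest:
--         head, rest = rest[0], rest[1:]
--         run = 0
--         while run < len(rest) and rest[run][0] == head[0] \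
--                 and rest[run][1] == head[1] and rest[run][3] == head[3]:
--             run += 1
--         if run:
--             head[2].extend(e[2][0] for e in rest[:run])
--         rest = rest[run:]
--         out.append(head)
--     return out
-- ===== Notes on version B (the rewrite author's own statement) =====
-- stated objective: alternative
-- what changed: Replaces A's single fold that compares each element against the mutable accumulator's last entry with a run-splitting scan: each maximal consecutive run with equal (hour, minute, month) key is detected up front and collapsed in one step by extending the run head's day list.
import Mathlib
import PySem

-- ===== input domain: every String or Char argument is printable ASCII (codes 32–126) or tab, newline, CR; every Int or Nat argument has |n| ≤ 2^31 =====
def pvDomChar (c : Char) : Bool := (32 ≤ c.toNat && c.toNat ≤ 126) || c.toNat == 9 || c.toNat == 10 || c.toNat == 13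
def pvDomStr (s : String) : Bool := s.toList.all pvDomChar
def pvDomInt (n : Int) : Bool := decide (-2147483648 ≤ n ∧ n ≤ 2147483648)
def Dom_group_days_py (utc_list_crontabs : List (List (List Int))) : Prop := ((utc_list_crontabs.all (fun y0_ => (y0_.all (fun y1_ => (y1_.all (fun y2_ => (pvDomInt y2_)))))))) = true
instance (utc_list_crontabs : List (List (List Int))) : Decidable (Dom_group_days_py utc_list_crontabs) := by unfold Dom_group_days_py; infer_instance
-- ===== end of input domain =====

-- B merges consecutive runs sharing (hour, minute, month) in one step instead of
-- comparing each element with the accumulator's last entry; return-value equivalence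
-- only (both Pythons mutate the emitted elements' day lists in place).

-- In-range row access e[i]; Pre_ excludes the inputs on which Python would raise
-- IndexError here, so the default [] / 0 is never the value A actually uses.
def pvIdx (e : List (List Int)) (i : Nat) : List Int := e.getD i []

-- ===== PORT A =====
-- one iteration of A's for-loop over `element` with accumulator `acc`
def pvStepA (acc : List (List (List Int))) (element : List (List Int)) : List (List (List Int)) :=
  if 0 < acc.length ∧
     pvIdx (acc.getLastD []) 0 = pvIdx element 0 ∧
     pvIdx (acc.getLastD []) 1 = pvIdx element 1 ∧
     pvIdx (acc.getLastD []) 3 = pvIdx element 3 then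
    -- acc[-1][2].append(element[2][0])
    acc.dropLast ++ [(acc.getLastD []).set 2 (pvIdx (acc.getLastD []) 2 ++ [(pvIdx element 2).getD 0 0])]
  else
    acc ++ [element]

def group_days_py (utc_list_crontabs : List (List (List Int))) : List (List (List Int)) :=
  utc_list_crontabs.foldl pvStepA []

-- ===== PORT B =====
def pvKey (e : List (List Int)) : List Int × List Int × List Int :=
  (pvIdx e 0, pvIdx e 1, pvIdx e 3)

-- head[2].extend(xs)
def pvExtend2 (e : List (List Int)) (xs : List Int) : List (List Int) :=
  e.set 2 (pvIdx e 2 ++ xs)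

-- e[2][0]
def pvFirstDay (e : List (List Int)) : Int := (pvIdx e 2).getD 0 0

-- outer while = recursion on the remaining suffix; the inner counting while
-- plus the rest[:run] / rest[run:] slices = takeWhile / dropWhile on the key test
def group_days_py_alt : List (List (List Int)) → List (List (List Int))
  | [] => []
  | head :: rest =>
    let same := rest.takeWhile (fun e => pvKey e == pvKey head)
    let rest' := rest.dropWhile (fun e => pvKey e == pvKey head)
    (if same.isEmpty then head else pvExtend2 head (same.map pvFirstDay)) ::
      group_days_py_alt rest'
termination_by l => l.length
decreasing_by
  simp only [List.length_cons]
  exact Nat.lt_succ_of_le (List.length_dropWhile_le _ _)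

-- ===== PRECONDITION & SPEC =====
-- mirrors Python's left-to-right short-circuit over one adjacent pair (p, e):
-- each index actually reached must be in range, and a merged row needs a
-- nonempty day list e[2]
def pvPairOk (p e : List (List Int)) : Bool :=
  decide (1 ≤ p.length) && decide (1 ≤ e.length) &&
  (!(pvIdx p 0 == pvIdx e 0) ||
   (decide (2 ≤ p.length) && decide (2 ≤ e.length) &&
    (!(pvIdx p 1 == pvIdx e 1) ||
     (decide (4 ≤ p.length) && decide (4 ≤ e.length) &&
      (!(pvIdx p 3 == pvIdx e 3) || !(pvIdx e 2 == ([] : List Int)))))))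

-- Pre_ excludes exactly the inputs on which Python A raises IndexError: an
-- adjacent pair whose comparison chain p[0]==e[0], p[1]==e[1], p[3]==e[3]
-- reaches a missing index, or a row merged into the previous one whose day
-- list e[2] is empty (element[2][0] raises there).
def Pre_group_days_py (utc_list_crontabs : List (List (List Int))) : Prop :=
  ((utc_list_crontabs.zip utc_list_crontabs.tail).all
    (fun q => pvPairOk q.1 q.2)) = true
instance (utc_list_crontabs : List (List (List Int))) : Decidable (Pre_group_days_py utc_list_crontabs) := by unfold Pre_group_days_py; infer_instance

def pvWitness_group_days_py : List (List (List Int)) :=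
  [[[1], [2], [3], [4]], [[1], [2], [5], [4]], [[9], [2], [6], [4]]]

def Spec_group_days_py (utc_list_crontabs : List (List (List Int))) (out : List (List (List Int))) : Prop := out = group_days_py_alt utc_list_crontabs
instance (utc_list_crontabs : List (List (List Int))) (out : List (List (List Int))) : Decidable (Spec_group_days_py utc_list_crontabs out) := by unfold Spec_group_days_py; infer_instance

-- ===== CLAIM (what is proved, stated in full; the proofs are below) =====
def Claim_equal_group_days_py : Prop := ∀ (utc_list_crontabs : List (List (List Int))), Dom_group_days_py utc_list_crontabs → Pre_group_days_py utc_list_crontabs → Spec_group_days_py utc_list_crontabs (group_days_py utc_list_crontabs)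

-- ===== LEMMAS AND PROOFS =====

-- A's fold, restarted at the current run head `last` (proof-only helper)
def pvRun (last : List (List Int)) : List (List (List Int)) → List (List (List Int))
  | [] => [last]
  | e :: rest =>
    if pvKey e = pvKey last then
      pvRun (last.set 2 (pvIdx last 2 ++ [pvFirstDay e])) rest
    else
      last :: pvRun e rest

theorem alt_nil : group_days_py_alt [] = [] := by
  rw [group_days_py_alt.eq_def]

theorem alt_cons (head : List (List Int)) (rest : List (List (List Int))) :
    group_days_py_alt (head :: rest) =
      (if (rest.takeWhile (fun e => pvKey e == pvKey head)).isEmpty then head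
       else pvExtend2 head ((rest.takeWhile (fun e => pvKey e == pvKey head)).map pvFirstDay)) ::
      group_days_py_alt (rest.dropWhile (fun e => pvKey e == pvKey head)) := by
  rw [group_days_py_alt.eq_def]

theorem pvIdx_set2 (e : List (List Int)) (v : List Int) (i : Nat) (hi : i ≠ 2) :
    pvIdx (e.set 2 v) i = pvIdx e i := by
  simp [pvIdx, List.getD_eq_getElem?_getD, List.getElem?_set_ne (by omega : 2 ≠ i)]

theorem pvKey_set2 (e : List (List Int)) (v : List Int) : pvKey (e.set 2 v) = pvKey e := by
  simp [pvKey, pvIdx_set2]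

theorem pvExtend2_set2 (e : List (List Int)) (v : List Int) (xs : List Int) :
    pvExtend2 (e.set 2 (pvIdx e 2 ++ v)) xs = pvExtend2 e (v ++ xs) := by
  by_cases h : 2 < e.length
  · simp [pvExtend2, pvIdx, List.set_set, List.getD_eq_getElem?_getD,
      h, List.append_assoc]
  · have hs : ∀ w : List Int, e.set 2 w = e := fun w => List.set_eq_of_length_le (by omega)
    simp [pvExtend2, hs]

theorem pvRun_foldl (rest : List (List (List Int))) :
    ∀ (pre : List (List (List Int))) (last : List (List Int)),
    List.foldl pvStepA (pre ++ [last]) rest = pre ++ pvRun last rest := by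
  induction rest with
  | nil => intro pre last; simp [pvRun]
  | cons e rest ih =>
    intro pre last
    have hlast : (pre ++ [last]).getLastD [] = last := by
      simp
    have hcond : (0 < (pre ++ [last]).length ∧
        pvIdx ((pre ++ [last]).getLastD []) 0 = pvIdx e 0 ∧
        pvIdx ((pre ++ [last]).getLastD []) 1 = pvIdx e 1 ∧
        pvIdx ((pre ++ [last]).getLastD []) 3 = pvIdx e 3) ↔ pvKey e = pvKey last := by
      simp [pvKey, Prod.ext_iff, eq_comm]
    rw [List.foldl_cons, pvStepA, pvRun]
    split_ifs with h1 h2 h2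
    · rw [hlast, List.dropLast_concat, ih pre]
      rfl
    · exact absurd (hcond.mp h1) h2
    · exact absurd (hcond.mpr h2) h1
    · rw [ih (pre ++ [last]) e]
      simp

theorem pvRun_alt (rest : List (List (List Int))) :
    ∀ (last : List (List Int)),
    pvRun last rest =
      (if (rest.takeWhile (fun e => pvKey e == pvKey last)).isEmpty then last
       else pvExtend2 last ((rest.takeWhile (fun e => pvKey e == pvKey last)).map pvFirstDay)) ::
      group_days_py_alt (rest.dropWhile (fun e => pvKey e == pvKey last)) := by
  induction rest with
  | nil => intro last; simp [pvRun, alt_nil]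
  | cons e rest ih =>
    intro last
    rw [pvRun]
    by_cases h : pvKey e = pvKey last
    · rw [if_pos h, ih]
      have hk : pvKey (last.set 2 (pvIdx last 2 ++ [pvFirstDay e])) = pvKey last :=
        pvKey_set2 _ _
      rw [List.takeWhile_cons, List.dropWhile_cons]
      simp only [hk, h, beq_self_eq_true, if_true, List.map_cons, List.isEmpty_cons]
      rcases htw : rest.takeWhile (fun x => pvKey x == pvKey last) with _ | ⟨a, tl⟩
      · simp [pvExtend2]
      · simp [pvExtend2_set2]
    · rw [if_neg h, List.takeWhile_cons, List.dropWhile_cons]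
      have hb : (pvKey e == pvKey last) = false := by simp [h]
      simp only [hb]
      simp
      rw [alt_cons, ih]

theorem group_days_eq (utc : List (List (List Int))) :
    group_days_py utc = group_days_py_alt utc := by
  cases utc with
  | nil => rw [alt_nil]; rfl
  | cons h t =>
    have h0 : pvStepA [] h = [] ++ [h] := by simp [pvStepA]
    rw [group_days_py, List.foldl_cons, h0, pvRun_foldl, List.nil_append,
      pvRun_alt, alt_cons]

-- ===== VERDICT (by name: the statement is the Claim_ definition above) =====
theorem group_days_py_spec : Claim_equal_group_days_py := by
  intro utc _ _
  exact group_days_eq utc
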